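-- pv_equiv track=rewrite | github.com/Tontris/AI_Systems | Lab6/Task1.py | build_freq_tables
-- ===== SOURCE A (Python) =====
-- from collections import Counter, defaultdict
--
-- def build_freq_tables(rows, feature_names, target_name="play"):
--     """Побудова частотних таблиць для ознак та класів."""
--     class_counts = Counter(r[target_name] for r in rows)
--     feat_counts = {f: {c: Counter() for c in class_counts} for f in feature_names}
--     value_domains = {f: set() for f in feature_names}
--
--     for r in rows:
--         c = r[target_name]
--         for f in feature_names:
--             v = r[f]
--             feat_counts[f][c][v] += 1
--             value_domains[f].add(v)
--
--     return class_counts, feat_counts, {f: sorted(list(vs)) for f, vs in value_domains.items()}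
-- ===== SOURCE B (Python) =====
-- from collections import Counter
--
-- def build_freq_tables(rows, feature_names, target_name="play"):
--     """Group rows by class first, then count each group's feature values per feature entry."""
--     groups = {}
--     for r in rows:
--         groups.setdefault(r[target_name], []).append(r)
--     class_counts = Counter({c: len(g) for c, g in groups.items()})
--     feat_counts = {}
--     for f in feature_names:
--         table = feat_counts.setdefault(f, {c: Counter() for c in groups})
--         for c, g in groups.items():
--             table[c].update(r[f] for r in g)
--     value_domains = {f: sorted({r[f] for r in rows}) for f in feature_names}
--     return class_counts, feat_counts, value_domains
-- ===== Notes on version B (the rewrite author's own statement) =====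
-- stated objective: alternative
-- what changed: B replaces A's single rows-scan with nested dict updates (feat_counts[f][c][v] += 1 plus a tracked domain set per feature) by a group-rows-by-class pass: class counts are the group sizes, each feature entry's table is filled by adding whole per-group value counts, and value domains are derived afterwards from a set comprehension over rows.
import Mathlib
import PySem

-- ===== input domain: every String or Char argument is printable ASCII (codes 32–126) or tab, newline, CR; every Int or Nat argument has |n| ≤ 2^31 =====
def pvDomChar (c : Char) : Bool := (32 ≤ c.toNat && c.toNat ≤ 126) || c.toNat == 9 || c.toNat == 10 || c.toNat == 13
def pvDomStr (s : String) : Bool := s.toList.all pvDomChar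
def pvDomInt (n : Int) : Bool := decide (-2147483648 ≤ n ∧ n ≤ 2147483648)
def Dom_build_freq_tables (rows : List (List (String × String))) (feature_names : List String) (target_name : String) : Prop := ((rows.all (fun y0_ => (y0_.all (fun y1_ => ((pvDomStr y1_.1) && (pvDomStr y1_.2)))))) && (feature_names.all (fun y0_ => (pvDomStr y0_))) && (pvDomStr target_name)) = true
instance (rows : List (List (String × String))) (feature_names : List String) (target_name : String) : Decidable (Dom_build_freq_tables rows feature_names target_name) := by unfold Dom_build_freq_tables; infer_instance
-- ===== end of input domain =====

-- B replaces A's single rows-scan with nested per-row dict updates by a group-rows-by-class pass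
-- followed by per-group counting for each feature entry; objective: alternative decomposition, same cost.

-- r[k] for a row dict r (first-match lookup); Pre_ guarantees the key is present (get? = none is Python's KeyError)
def pvGet (r : List (String × String)) (k : String) : String :=
  ((PySem.Dict.mk r).get? k).getD ""

-- ===== PORT A =====
def build_freq_tables (rows : List (List (String × String))) (feature_names : List String) (target_name : String) : (List (String × Int)) × (List (String × List (String × List (String × Int)))) × (List (String × List String)) :=
  let class_counts : PySem.Dict String Int :=
    PySem.Dict.counter (rows.map (fun r => pvGet r target_name))
  let feat_counts0 : PySem.Dict String (PySem.Dict String (PySem.Dict String Int)) :=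
    feature_names.foldl (fun d f => d.insert f
      (class_counts.keys.foldl (fun d2 c => d2.insert c (PySem.Dict.empty : PySem.Dict String Int)) PySem.Dict.empty)) PySem.Dict.empty
  let value_domains0 : PySem.Dict String (PySem.Set String) :=
    feature_names.foldl (fun d f => d.insert f (PySem.Set.empty : PySem.Set String)) PySem.Dict.empty
  -- the rows loop; the modify defaults are unreachable (f and c are always present as keys)
  let st := rows.foldl (fun st r =>
      feature_names.foldl (fun (st : PySem.Dict String (PySem.Dict String (PySem.Dict String Int)) × PySem.Dict String (PySem.Set String)) f =>
        (st.1.modify f PySem.Dict.empty (fun inner =>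
           inner.modify (pvGet r target_name) PySem.Dict.empty (fun ctr =>
             ctr.modify (pvGet r f) 0 (· + 1))),
         st.2.modify f [] (fun s => PySem.Set.add s (pvGet r f)))) st)
    (feat_counts0, value_domains0)
  (class_counts.items,
   st.1.items.map (fun p => (p.1, p.2.items.map (fun q => (q.1, q.2.items)))),
   st.2.items.map (fun p => (p.1, PySem.List.sorted p.2 (fun x => x) false)))

-- ===== PORT B =====
def build_freq_tables_alt (rows : List (List (String × String))) (feature_names : List String) (target_name : String) : (List (String × Int)) × (List (String × List (String × List (String × Int)))) × (List (String × List String)) :=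
  let groups : PySem.Dict String (List (List (String × String))) :=
    rows.foldl (fun d r => d.modify (pvGet r target_name) [] (fun g => g ++ [r])) PySem.Dict.empty
  let class_counts := groups.items.map (fun p => (p.1, (p.2.length : Int)))
  -- feat_counts: per feature entry, fetch/create its table and add each group's value counts
  let feat_counts : PySem.Dict String (PySem.Dict String (PySem.Dict String Int)) :=
    feature_names.foldl (fun fc f =>
      groups.items.foldl (fun fc p =>
          fc.modify f PySem.Dict.empty (fun table =>
            table.modify p.1 PySem.Dict.empty (fun ctr =>
              (p.2.map (fun r => pvGet r f)).foldl (fun ctr v => ctr.modify v 0 (· + 1)) ctr)))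
        (fc.setdefault f (groups.keys.foldl (fun d c => d.insert c (PySem.Dict.empty : PySem.Dict String Int)) PySem.Dict.empty)))
      PySem.Dict.empty
  let value_domains :=
    (feature_names.foldl (fun d f =>
        d.insert f (PySem.List.sorted (PySem.Set.ofList (rows.map (fun r => pvGet r f))) (fun x => x) false)) PySem.Dict.empty).items
  (class_counts,
   feat_counts.items.map (fun p => (p.1, p.2.items.map (fun q => (q.1, q.2.items)))),
   value_domains)

-- ===== PRECONDITION & SPEC =====
-- Pre_ excludes exactly the rows missing the target key or a feature key, on which A raises KeyError.
def Pre_build_freq_tables (rows : List (List (String × String))) (feature_names : List String) (target_name : String) : Prop :=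
  ∀ r ∈ rows, (PySem.Dict.mk r).contains target_name = true ∧
    ∀ f ∈ feature_names, (PySem.Dict.mk r).contains f = true
instance (rows : List (List (String × String))) (feature_names : List String) (target_name : String) : Decidable (Pre_build_freq_tables rows feature_names target_name) := by unfold Pre_build_freq_tables; infer_instance
def pvWitness_build_freq_tables : (List (List (String × String))) × List String × String :=
  ([[("outlook", "sunny"), ("play", "yes")], [("outlook", "rain"), ("play", "no")], [("outlook", "sunny"), ("play", "no")]], ["outlook"], "play")

def Spec_build_freq_tables (rows : List (List (String × String))) (feature_names : List String) (target_name : String) (out : (List (String × Int)) × (List (String × List (String × List (String × Int)))) × (List (String × List String))) : Prop := out = build_freq_tables_alt rows feature_names target_name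
instance (rows : List (List (String × String))) (feature_names : List String) (target_name : String) (out : (List (String × Int)) × (List (String × List (String × List (String × Int)))) × (List (String × List String))) : Decidable (Spec_build_freq_tables rows feature_names target_name out) := by
  unfold Spec_build_freq_tables
  letI : DecidableEq (List (String × List (String × List (String × Int)))) := fun a b => List.hasDecEq a b
  infer_instance

-- ===== CLAIM (what is proved, stated in full; the proofs are below) =====
def Claim_equal_build_freq_tables : Prop := ∀ (rows : List (List (String × String))) (feature_names : List String) (target_name : String), Dom_build_freq_tables rows feature_names target_name → Pre_build_freq_tables rows feature_names target_name → Spec_build_freq_tables rows feature_names target_name (build_freq_tables rows feature_names target_name)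

-- ===== LEMMAS AND PROOFS =====

-- ---------- small generic facts about String-keyed dicts, sets and folds ----------

-- getD after a fold of inserts whose value depends only on the key (last duplicate wins, same value)
lemma getD_foldl_insert_keyfun {ν : Type} (l : List String) (v : String → ν) (d : PySem.Dict String ν)
    (d0 : ν) (f : String) :
    (l.foldl (fun d x => d.insert x (v x)) d).getD f d0 = if f ∈ l then v f else d.getD f d0 := by
  induction l generalizing d with
  | nil => simp
  | cons x t ih =>
    simp only [List.foldl_cons, ih, PySem.Dict.getD_insert, List.mem_cons]
    by_cases h1 : f ∈ t <;> by_cases h2 : f = x <;> simp [h1, h2]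

-- a fold over a list whose every step acts on key (key r) extracts, at a fixed key c, to a fold over
-- the matching elements only
lemma getD_foldl_of_pointwise {α ν : Type} (l : List α) (step : PySem.Dict String ν → α → PySem.Dict String ν)
    (key : α → String) (h : α → ν → ν) (d0 : ν) (c : String)
    (H : ∀ d r, r ∈ l → (step d r).getD c d0 = if key r = c then h r (d.getD c d0) else d.getD c d0)
    (d : PySem.Dict String ν) :
    (l.foldl step d).getD c d0 = (l.filter (fun r => key r == c)).foldl (fun v r => h r v) (d.getD c d0) := by
  induction l generalizing d with
  | nil => simp
  | cons r t ih =>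
    simp only [List.foldl_cons, List.filter_cons]
    rw [ih (fun d r hr => H d r (by simp [hr])) (step d r), H d r (by simp)]
    by_cases hc : key r = c
    · simp [hc]
    · simp [hc]

-- updating a set with elements it already contains changes nothing
lemma set_update_of_subset (l : List String) (s : PySem.Set String) (h : ∀ x ∈ l, x ∈ s) :
    PySem.Set.update s l = s := by
  induction l with
  | nil => rfl
  | cons x t ih =>
    have hx : PySem.Set.add s x = s := by
      simp [PySem.Set.add, PySem.Set.contains, h x (by simp)]
    show PySem.Set.update (PySem.Set.add s x) t = s
    rw [hx]; exact ih (fun y hy => h y (by simp [hy]))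

lemma set_add_idem (s : PySem.Set String) (x : String) :
    PySem.Set.add (PySem.Set.add s x) x = PySem.Set.add s x :=
  set_update_of_subset [x] (PySem.Set.add s x)
    (fun y hy => by
      have : y = x := by simpa using hy
      exact this ▸ (PySem.Set.mem_add s x x).mpr (Or.inr rfl))

lemma set_update_nil_eq_ofList (l : List String) :
    PySem.Set.update ([] : PySem.Set String) l = PySem.Set.ofList l := by
  rw [PySem.Set.ofList_eq_foldl]; rfl

-- a fold over rows whose every step preserves a key-set invariant
lemma keys_foldl_inv {α ν : Type} (l : List α) (step : PySem.Dict String ν → α → PySem.Dict String ν)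
    (d : PySem.Dict String ν) (K : List String) (hd : d.keys = K)
    (h : ∀ d a, a ∈ l → PySem.Dict.keys d = K → (step d a).keys = K) :
    (l.foldl step d).keys = K := by
  induction l generalizing d with
  | nil => exact hd
  | cons x t ih =>
    exact ih _ (h d x (by simp) hd) (fun d a ha => h d a (by simp [ha]))

-- a fold over a list whose every step turns the key set s into Set.update s [key r] accumulates
lemma keys_foldl_of_update {α ν : Type} (l : List α) (step : PySem.Dict String ν → α → PySem.Dict String ν)
    (key : α → String)
    (H : ∀ d r, r ∈ l → (step d r).keys = PySem.Set.update d.keys [key r])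
    (d : PySem.Dict String ν) :
    (l.foldl step d).keys = PySem.Set.update d.keys (l.map key) := by
  induction l generalizing d with
  | nil => rfl
  | cons r t ih =>
    rw [List.foldl_cons, ih (fun d r hr => H d r (by simp [hr])), H d r (by simp)]
    rfl

lemma keys_foldl_insert_empty {ν : Type} (l : List String) (f : PySem.Dict String ν → String → ν) :
    (l.foldl (fun d x => d.insert x (f d x)) PySem.Dict.empty).keys = PySem.Set.ofList l := by
  rw [PySem.Dict.keys_foldl_insert, PySem.Dict.keys_empty, PySem.Set.ofList_eq_foldl]
  rfl

-- modify always leaves the key present: keys grow exactly by Set.add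
lemma keys_modify_eq_add {ν : Type} (d : PySem.Dict String ν) (x : String) (d0 : ν) (h : ν → ν) :
    (d.modify x d0 h).keys = PySem.Set.add d.keys x := by
  rw [PySem.Dict.keys_modify]
  by_cases hc : d.contains x = true
  · rw [PySem.Dict.keys_insert_of_contains _ _ hc]
    have : x ∈ d.keys := (PySem.Dict.contains_iff_mem_keys d x).mp hc
    simp [PySem.Set.add, PySem.Set.contains, this]
  · rw [PySem.Dict.keys_insert_of_not_contains _ _ (by simpa using hc)]
    have : ¬ x ∈ d.keys := fun hm => hc ((PySem.Dict.contains_iff_mem_keys d x).mpr hm)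
    simp [PySem.Set.add, PySem.Set.contains, this]

-- iterating a modify at a fixed key: getD at any key, and the key set
lemma getD_iterate_modify {ν : Type} (n : Nat) (x c : String) (d0 : ν) (h : ν → ν)
    (d : PySem.Dict String ν) :
    ((fun d => PySem.Dict.modify d x d0 h)^[n] d).getD c d0 =
      if c = x then h^[n] (d.getD c d0) else d.getD c d0 := by
  induction n generalizing d with
  | zero => by_cases hc : c = x <;> simp [hc]
  | succ m ih =>
    rw [Function.iterate_succ_apply, ih]
    by_cases hc : c = x
    · subst hc; simp [PySem.Dict.getD_modify_self, Function.iterate_succ_apply]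
    · simp [hc, PySem.Dict.getD_modify_of_ne d d0 h hc]

lemma keys_iterate_modify {ν : Type} (n : Nat) (hn : n ≠ 0) (x : String) (d0 : ν) (h : ν → ν)
    (d : PySem.Dict String ν) :
    ((fun d => PySem.Dict.modify d x d0 h)^[n] d).keys = PySem.Set.add d.keys x := by
  induction n generalizing d with
  | zero => exact absurd rfl hn
  | succ m ih =>
    rw [Function.iterate_succ_apply]
    by_cases hm : m = 0
    · subst hm; simpa using keys_modify_eq_add d x d0 h
    · rw [ih hm, keys_modify_eq_add, set_add_idem]

-- getD after a fold of modifies keyed by the elements, with duplicates: the per-key function iterates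
lemma getD_foldl_modify_count {ν : Type} (l : List String) (g : String → ν → ν) (d0 : ν)
    (d : PySem.Dict String ν) (f : String) :
    (l.foldl (fun d x => d.modify x d0 (g x)) d).getD f d0 = (g f)^[l.count f] (d.getD f d0) := by
  induction l generalizing d with
  | nil => simp
  | cons x t ih =>
    rw [List.foldl_cons, ih]
    by_cases hx : x = f
    · subst hx
      rw [PySem.Dict.getD_modify_self]
      simp [Function.iterate_succ_apply]
    · rw [PySem.Dict.getD_modify_of_ne d d0 (g x) (fun h => hx h.symm)]
      simp [hx]

-- get? of a present key
lemma get?_of_contains {ν : Type} (d : PySem.Dict String ν) (f : String) (d0 : ν)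
    (h : d.contains f = true) : d.get? f = some (d.getD f d0) := by
  rw [PySem.Dict.contains_eq_isSome_get?] at h
  obtain ⟨v, hv⟩ := Option.isSome_iff_exists.mp h
  rw [hv, PySem.Dict.getD_of_get?_eq_some d d0 hv]

lemma get?_modify_self {ν : Type} (d : PySem.Dict String ν) (x : String) (d0 : ν) (h : ν → ν) :
    (d.modify x d0 h).get? x = some (h (d.getD x d0)) := by
  have hc : (d.modify x d0 h).contains x = true := by
    rw [PySem.Dict.contains_modify]; simp
  rw [get?_of_contains _ x d0 hc, PySem.Dict.getD_modify_self]

lemma get?_modify_of_ne {ν : Type} (d : PySem.Dict String ν) (x f : String) (d0 : ν) (h : ν → ν)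
    (hne : f ≠ x) : (d.modify x d0 h).get? f = d.get? f := by
  by_cases hc : d.contains f = true
  · have hc' : (d.modify x d0 h).contains f = true := by
      rw [PySem.Dict.contains_modify]; simp [hc]
    rw [get?_of_contains _ f d0 hc', get?_of_contains _ f d0 hc,
      PySem.Dict.getD_modify_of_ne d d0 h hne]
  · have hc' : ¬ (d.modify x d0 h).contains f = true := by
      rw [PySem.Dict.contains_modify]
      simp [hne, Bool.eq_false_iff.mpr hc]
    rw [(PySem.Dict.get?_eq_none_iff_contains _ f).mpr (by simpa using hc'),
      (PySem.Dict.get?_eq_none_iff_contains _ f).mpr (by simpa using hc)]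

-- a fold of modifies all at one present key composes the value functions
lemma get?_foldl_modify_same {α ν : Type} (l : List α) (g : α → ν → ν) (d0 : ν) (x : String)
    (d : PySem.Dict String ν) (t : ν) (h : d.get? x = some t) :
    (l.foldl (fun d p => d.modify x d0 (g p)) d).get? x = some (l.foldl (fun v p => g p v) t) := by
  induction l generalizing d t with
  | nil => simpa using h
  | cons p u ih =>
    rw [List.foldl_cons, List.foldl_cons]
    exact ih _ _ (by rw [get?_modify_self, PySem.Dict.getD_of_get?_eq_some d d0 h])

lemma get?_foldl_modify_other {α ν : Type} (l : List α) (g : α → ν → ν) (d0 : ν) (x f : String)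
    (hne : f ≠ x) (d : PySem.Dict String ν) :
    (l.foldl (fun d p => d.modify x d0 (g p)) d).get? f = d.get? f := by
  induction l generalizing d with
  | nil => rfl
  | cons p u ih => rw [List.foldl_cons, ih, get?_modify_of_ne _ _ _ _ _ hne]

-- ---------- the two ports, characterised ----------

-- B's grouping dict: items are the classes in first-occurrence order, paired with their row groups
lemma groups_items (rows : List (List (String × String))) (tn : String) :
    (rows.foldl (fun d r => d.modify (pvGet r tn) [] (fun g => g ++ [r])) PySem.Dict.empty).items
    = (PySem.Set.ofList (rows.map (fun r => pvGet r tn))).map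
        (fun c => (c, rows.filter (fun r => pvGet r tn == c))) := by
  have hk : (rows.foldl (fun d r => d.modify (pvGet r tn) [] (fun g => g ++ [r])) PySem.Dict.empty).keys
      = PySem.Set.ofList (rows.map (fun r => pvGet r tn)) := by
    rw [PySem.Dict.keys_foldl_modify_key rows (fun r => pvGet r tn) [] (fun _ r g => g ++ [r]) PySem.Dict.empty,
      PySem.Dict.keys_empty, set_update_nil_eq_ofList]
  rw [PySem.Dict.items_eq_map_keys _ (by rw [hk]; exact PySem.Set.nodup_ofList _) [], hk]
  apply List.map_eq_map_iff.mpr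
  intro c hc
  rw [getD_foldl_of_pointwise rows _ (fun r => pvGet r tn) (fun r g => g ++ [r]) [] c
    (fun d r _ => by
      by_cases h : pvGet r tn = c
      · subst h; rw [PySem.Dict.getD_modify_self]; simp
      · rw [PySem.Dict.getD_modify_of_ne _ _ _ (Ne.symm h)]; simp [h]),
    PySem.Dict.getD_empty, PySem.List.foldl_append_singleton_eq_self]
  simp

lemma groups_keys (rows : List (List (String × String))) (tn : String) :
    (rows.foldl (fun d r => d.modify (pvGet r tn) [] (fun g => g ++ [r])) PySem.Dict.empty).keys
    = PySem.Set.ofList (rows.map (fun r => pvGet r tn)) := by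
  rw [PySem.Dict.keys_foldl_modify_key rows (fun r => pvGet r tn) [] (fun _ r g => g ++ [r]) PySem.Dict.empty,
    PySem.Dict.keys_empty, set_update_nil_eq_ofList]

-- filtering the class/group pairs at one class
lemma filter_class_pairs {β : Type} (classes : List String) (hnd : classes.Nodup) (c : String)
    (hc : c ∈ classes) (h : String → β) :
    (classes.map (fun c' => (c', h c'))).filter (fun p => p.1 == c) = [(c, h c)] := by
  induction classes with
  | nil => cases hc
  | cons x t ih =>
    obtain ⟨hx, ht⟩ := List.nodup_cons.mp hnd
    rcases List.mem_cons.mp hc with hh | hh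
    · subst hh
      have : (t.map (fun c' => (c', h c'))).filter (fun p => p.1 == c) = [] := by
        apply List.filter_eq_nil_iff.mpr
        intro p hp
        obtain ⟨c', hc', rfl⟩ := List.mem_map.mp hp
        simp only [beq_iff_eq]
        exact fun he => hx (he ▸ hc')
      simp [this]
    · have hxc : x ≠ c := fun he => hx (he ▸ hh)
      simp only [List.map_cons, List.filter_cons]
      rw [if_neg (by simpa using hxc)]
      exact ih ht hh

lemma iterate_add_one (k : Nat) (x : Int) : (fun y => y + 1)^[k] x = x + k := by
  induction k generalizing x with
  | zero => simp
  | succ n ihn => rw [Function.iterate_succ_apply, ihn]; push_cast; ring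

lemma foldl_const_add (m : List String) (k : Nat) (a : Int) :
    m.foldl (fun acc _ => acc + (k : Int)) a = a + (m.length : Int) * (k : Int) := by
  induction m generalizing a with
  | nil => simp
  | cons x t ih => rw [List.foldl_cons, ih]; simp [List.length_cons]; ring

-- the per-class counter built with k repetitions per element equals k batch passes (as dicts)
lemma counter_iter_eq (ws : List String) (k : Nat) (hk : k ≠ 0) :
    ws.foldl (fun t v => (fun t => PySem.Dict.modify t v 0 (· + 1))^[k] t) (PySem.Dict.empty : PySem.Dict String Int)
    = (fun t => ws.foldl (fun t v => t.modify v 0 (· + 1)) t)^[k] PySem.Dict.empty := by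
  have hkeysL : (ws.foldl (fun t v => (fun t => PySem.Dict.modify t v 0 (· + 1))^[k] t) (PySem.Dict.empty : PySem.Dict String Int)).keys
      = PySem.Set.ofList ws := by
    rw [keys_foldl_of_update ws _ (fun v => v)
      (fun d v _ => by rw [keys_iterate_modify k hk v 0 _ d]; rfl) PySem.Dict.empty,
      PySem.Dict.keys_empty]
    have hmap : List.map (fun (v : String) => v) ws = ws := by simp
    rw [hmap, set_update_nil_eq_ofList]
  have hbatch_keys : ∀ n, (((fun t => ws.foldl (fun t v => t.modify v 0 (· + 1)) t)^[n] (PySem.Dict.empty : PySem.Dict String Int)).keys)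
      = if n = 0 then [] else PySem.Set.ofList ws := by
    intro n
    induction n with
    | zero => simp
    | succ m ihm =>
      rw [Function.iterate_succ_apply', PySem.Dict.keys_foldl_modify ws 0 (fun _ v => (· + 1)) _, ihm]
      by_cases hm : m = 0
      · simp [hm, set_update_nil_eq_ofList]
      · rw [if_neg hm, if_neg (Nat.succ_ne_zero m)]
        exact set_update_of_subset ws _ (fun x hx => (PySem.Set.mem_ofList ws x).mpr hx)
  have hgetL : ∀ v, (ws.foldl (fun t v => (fun t => PySem.Dict.modify t v 0 (· + 1))^[k] t) (PySem.Dict.empty : PySem.Dict String Int)).getD v 0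
      = (k : Int) * (ws.count v : Int) := by
    intro v
    rw [getD_foldl_of_pointwise ws _ (fun w => w) (fun _ a => a + (k : Int)) 0 v
      (fun d w _ => by
        rw [getD_iterate_modify k w v 0 _ d]
        have hit : ∀ (x : Int), (fun y => y + 1)^[k] x = x + k := fun x => iterate_add_one k x
        by_cases hvw : v = w
        · simp [hvw, hit]
        · simp [hvw, Ne.symm hvw])
      PySem.Dict.empty, PySem.Dict.getD_empty]
    rw [foldl_const_add, List.count, List.countP_eq_length_filter]
    ring
  have hgetR : ∀ n v, (((fun t => ws.foldl (fun t v => t.modify v 0 (· + 1)) t)^[n] (PySem.Dict.empty : PySem.Dict String Int)).getD v 0)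
      = (n : Int) * (ws.count v : Int) := by
    intro n v
    induction n with
    | zero => simp
    | succ m ihm =>
      rw [Function.iterate_succ_apply', PySem.Dict.getD_foldl_modify_add_one, ihm]
      push_cast
      ring
  apply PySem.Dict.ext
  rw [PySem.Dict.items_eq_map_keys _ (by rw [hkeysL]; exact PySem.Set.nodup_ofList _) 0,
    PySem.Dict.items_eq_map_keys _ (by rw [hbatch_keys k]; simp [hk]) 0,
    hkeysL, hbatch_keys k, if_neg hk]
  apply List.map_eq_map_iff.mpr
  intro v _
  rw [hgetL v, hgetR k v]

-- iterating Set.add at one element is idempotent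
lemma set_add_iterate (k : Nat) (hk : k ≠ 0) (v : String) (s : PySem.Set String) :
    (fun s => PySem.Set.add s v)^[k] s = PySem.Set.add s v := by
  induction k generalizing s with
  | zero => exact absurd rfl hk
  | succ m ih =>
    rw [Function.iterate_succ_apply]
    by_cases hm : m = 0
    · simp [hm]
    · rw [ih hm, set_add_idem]

-- A's per-row nested update of feat_counts / value_domains (the inner feature loop, pair split)
def pvStepF (fns : List String) (tn : String)
    (fc : PySem.Dict String (PySem.Dict String (PySem.Dict String Int))) (r : List (String × String)) :
    PySem.Dict String (PySem.Dict String (PySem.Dict String Int)) :=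
  fns.foldl (fun d f => d.modify f PySem.Dict.empty (fun inner =>
    inner.modify (pvGet r tn) PySem.Dict.empty (fun ctr => ctr.modify (pvGet r f) 0 (· + 1)))) fc

def pvStepV (fns : List String) (vd : PySem.Dict String (PySem.Set String)) (r : List (String × String)) :
    PySem.Dict String (PySem.Set String) :=
  fns.foldl (fun d f => d.modify f [] (fun s => PySem.Set.add s (pvGet r f))) vd

-- B's per-feature batch update: add every group's value counts to the feature's table
def pvWB (gitems : List (String × List (List (String × String)))) (f : String)
    (t : PySem.Dict String (PySem.Dict String Int)) : PySem.Dict String (PySem.Dict String Int) :=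
  gitems.foldl (fun t p => t.modify p.1 PySem.Dict.empty (fun ctr =>
    (p.2.map (fun r => pvGet r f)).foldl (fun ctr v => ctr.modify v 0 (· + 1)) ctr)) t

lemma keys_rows_stepF (rows : List (List (String × String))) (fns : List String) (tn : String)
    (d : PySem.Dict String (PySem.Dict String (PySem.Dict String Int)))
    (hd : d.keys = PySem.Set.ofList fns) :
    (rows.foldl (pvStepF fns tn) d).keys = PySem.Set.ofList fns := by
  refine keys_foldl_inv rows _ _ _ hd (fun d r _ hk => ?_)
  rw [pvStepF, PySem.Dict.keys_foldl_modify, hk,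
    set_update_of_subset fns _ (fun x hx => (PySem.Set.mem_ofList fns x).mpr hx)]

lemma keys_rows_stepV (rows : List (List (String × String))) (fns : List String)
    (d : PySem.Dict String (PySem.Set String)) (hd : d.keys = PySem.Set.ofList fns) :
    (rows.foldl (pvStepV fns) d).keys = PySem.Set.ofList fns := by
  refine keys_foldl_inv rows _ _ _ hd (fun d r _ hk => ?_)
  rw [pvStepV, PySem.Dict.keys_foldl_modify, hk,
    set_update_of_subset fns _ (fun x hx => (PySem.Set.mem_ofList fns x).mpr hx)]

lemma getD_rows_stepF (rows : List (List (String × String))) (fns : List String) (tn f : String)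
    (d : PySem.Dict String (PySem.Dict String (PySem.Dict String Int))) :
    (rows.foldl (pvStepF fns tn) d).getD f PySem.Dict.empty
    = rows.foldl (fun i r => (fun i => PySem.Dict.modify i (pvGet r tn) PySem.Dict.empty
        (fun ctr => ctr.modify (pvGet r f) 0 (· + 1)))^[fns.count f] i) (d.getD f PySem.Dict.empty) := by
  induction rows generalizing d with
  | nil => rfl
  | cons r t ih =>
    rw [List.foldl_cons, ih, List.foldl_cons]
    congr 1
    show (pvStepF fns tn d r).getD f PySem.Dict.empty = _
    rw [pvStepF, getD_foldl_modify_count fns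
      (fun x inner => inner.modify (pvGet r tn) PySem.Dict.empty (fun ctr => ctr.modify (pvGet r x) 0 (· + 1)))
      PySem.Dict.empty d f]

lemma getD_rows_stepV (rows : List (List (String × String))) (fns : List String) (f : String)
    (hf : f ∈ fns) (d : PySem.Dict String (PySem.Set String)) :
    (rows.foldl (pvStepV fns) d).getD f []
    = rows.foldl (fun s r => PySem.Set.add s (pvGet r f)) (d.getD f []) := by
  have hk : fns.count f ≠ 0 := by
    have := List.count_pos_iff.mpr hf
    omega
  induction rows generalizing d with
  | nil => rfl
  | cons r t ih =>
    rw [List.foldl_cons, ih, List.foldl_cons]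
    congr 1
    show (pvStepV fns d r).getD f [] = _
    rw [pvStepV, getD_foldl_modify_count fns (fun x s => PySem.Set.add s (pvGet r x)) [] d f,
      set_add_iterate _ hk]

-- B's feature fold, characterised through get?
lemma B_fold_get? (fns : List String) (gitems : List (String × List (List (String × String))))
    (i0 : PySem.Dict String (PySem.Dict String Int)) (f : String)
    (fc : PySem.Dict String (PySem.Dict String (PySem.Dict String Int))) :
    (fns.foldl (fun fc x =>
      gitems.foldl (fun fc p =>
          fc.modify x PySem.Dict.empty (fun table =>
            table.modify p.1 PySem.Dict.empty (fun ctr =>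
              (p.2.map (fun r => pvGet r x)).foldl (fun ctr v => ctr.modify v 0 (· + 1)) ctr)))
        (fc.setdefault x i0)) fc).get? f
    = if f ∈ fns then some ((pvWB gitems f)^[fns.count f] ((fc.get? f).getD i0)) else fc.get? f := by
  induction fns generalizing fc with
  | nil => simp
  | cons x t ih =>
    rw [List.foldl_cons, ih]
    by_cases hx : x = f
    · subst hx
      have h1 : (gitems.foldl (fun fc p =>
          fc.modify x PySem.Dict.empty (fun table =>
            table.modify p.1 PySem.Dict.empty (fun ctr =>
              (p.2.map (fun r => pvGet r x)).foldl (fun ctr v => ctr.modify v 0 (· + 1)) ctr)))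
        (fc.setdefault x i0)).get? x = some (pvWB gitems x ((fc.get? x).getD i0)) := by
        rw [get?_foldl_modify_same gitems _ PySem.Dict.empty x _ _ (PySem.Dict.get?_setdefault_self fc x i0)]
        rfl
      rw [h1]
      by_cases ht : x ∈ t
      · rw [if_pos ht, if_pos (by simp), Option.getD_some, List.count_cons_self,
          ← Function.iterate_succ_apply]
      · rw [if_neg ht, if_pos (by simp), List.count_cons_self,
          List.count_eq_zero_of_not_mem ht]
        simp
    · have h2 : (gitems.foldl (fun fc p =>
          fc.modify x PySem.Dict.empty (fun table =>
            table.modify p.1 PySem.Dict.empty (fun ctr =>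
              (p.2.map (fun r => pvGet r x)).foldl (fun ctr v => ctr.modify v 0 (· + 1)) ctr)))
        (fc.setdefault x i0)).get? f = fc.get? f := by
        rw [get?_foldl_modify_other gitems _ PySem.Dict.empty x f (fun h => hx h.symm),
          PySem.Dict.get?_setdefault_of_ne fc i0 (fun h => hx h.symm)]
      rw [h2]
      by_cases ht : f ∈ t
      · simp [ht, hx]
      · simp [ht, Ne.symm hx]

lemma keys_setdefault_eq_add {ν : Type} (d : PySem.Dict String ν) (x : String) (v : ν) :
    (d.setdefault x v).keys = PySem.Set.add d.keys x := by
  rw [PySem.Dict.keys_setdefault]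
  by_cases hc : d.contains x = true
  · have : x ∈ d.keys := (PySem.Dict.contains_iff_mem_keys d x).mp hc
    simp [hc, PySem.Set.add, PySem.Set.contains, this]
  · have : ¬ x ∈ d.keys := fun hm => hc ((PySem.Dict.contains_iff_mem_keys d x).mpr hm)
    simp [hc, PySem.Set.add, PySem.Set.contains, this]

lemma keys_B_fold (fns : List String) (gitems : List (String × List (List (String × String))))
    (i0 : PySem.Dict String (PySem.Dict String Int)) :
    (fns.foldl (fun fc x =>
      gitems.foldl (fun fc p =>
          fc.modify x PySem.Dict.empty (fun table =>
            table.modify p.1 PySem.Dict.empty (fun ctr =>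
              (p.2.map (fun r => pvGet r x)).foldl (fun ctr v => ctr.modify v 0 (· + 1)) ctr)))
        (fc.setdefault x i0)) PySem.Dict.empty).keys = PySem.Set.ofList fns := by
  rw [keys_foldl_of_update fns _ (fun x => x) (fun d x _ => ?_) PySem.Dict.empty]
  · rw [PySem.Dict.keys_empty]
    have : List.map (fun (x : String) => x) fns = fns := by simp
    rw [this, set_update_nil_eq_ofList]
  · rw [PySem.Dict.keys_foldl_modify_key gitems (fun _ => x) PySem.Dict.empty _ _,
      keys_setdefault_eq_add]
    have : PySem.Set.update (PySem.Set.add d.keys x) (gitems.map (fun _ => x)) = PySem.Set.add d.keys x := by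
      refine set_update_of_subset _ _ (fun y hy => ?_)
      obtain ⟨_, _, rfl⟩ := List.mem_map.mp hy
      exact (PySem.Set.mem_add _ x x).mpr (Or.inr rfl)
    rw [this]
    rfl

-- the core level-2 equality: A's row-major iterated updates equal B's k batch passes
lemma level2_eq (rows : List (List (String × String))) (tn f : String) (k : Nat) (hk : k ≠ 0) :
    rows.foldl (fun i r => (fun i => PySem.Dict.modify i (pvGet r tn) PySem.Dict.empty
        (fun ctr => ctr.modify (pvGet r f) 0 (· + 1)))^[k] i)
      ((PySem.Set.ofList (rows.map (fun r => pvGet r tn))).foldl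
        (fun d c => d.insert c (PySem.Dict.empty : PySem.Dict String Int)) PySem.Dict.empty)
    = (pvWB ((PySem.Set.ofList (rows.map (fun r => pvGet r tn))).map
        (fun c => (c, rows.filter (fun r => pvGet r tn == c)))) f)^[k]
      ((PySem.Set.ofList (rows.map (fun r => pvGet r tn))).foldl
        (fun d c => d.insert c (PySem.Dict.empty : PySem.Dict String Int)) PySem.Dict.empty) := by
  have hcl : ((PySem.Set.ofList (rows.map (fun r => pvGet r tn))).foldl
      (fun d c => d.insert c (PySem.Dict.empty : PySem.Dict String Int)) PySem.Dict.empty).keys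
      = PySem.Set.ofList (rows.map (fun r => pvGet r tn)) := by
    rw [keys_foldl_insert_empty, PySem.Set.ofList_eq_self_of_nodup _ (PySem.Set.nodup_ofList _)]
  have hkL : (rows.foldl (fun i r => (fun i => PySem.Dict.modify i (pvGet r tn) PySem.Dict.empty
        (fun ctr => ctr.modify (pvGet r f) 0 (· + 1)))^[k] i)
      ((PySem.Set.ofList (rows.map (fun r => pvGet r tn))).foldl
        (fun d c => d.insert c (PySem.Dict.empty : PySem.Dict String Int)) PySem.Dict.empty)).keys
      = PySem.Set.ofList (rows.map (fun r => pvGet r tn)) := by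
    rw [keys_foldl_of_update rows _ (fun r => pvGet r tn)
      (fun d r _ => by rw [keys_iterate_modify k hk _ _ _ d]; rfl) _, hcl,
      set_update_of_subset _ _ (fun x hx => (PySem.Set.mem_ofList _ x).mpr hx)]
  have hkR : ∀ n, (((pvWB ((PySem.Set.ofList (rows.map (fun r => pvGet r tn))).map
        (fun c => (c, rows.filter (fun r => pvGet r tn == c)))) f)^[n]
      ((PySem.Set.ofList (rows.map (fun r => pvGet r tn))).foldl
        (fun d c => d.insert c (PySem.Dict.empty : PySem.Dict String Int)) PySem.Dict.empty)).keys)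
      = PySem.Set.ofList (rows.map (fun r => pvGet r tn)) := by
    intro n
    induction n with
    | zero => simpa using hcl
    | succ m ihm =>
      rw [Function.iterate_succ_apply', pvWB,
        PySem.Dict.keys_foldl_modify_key ((PySem.Set.ofList (rows.map (fun r => pvGet r tn))).map
          (fun c => (c, rows.filter (fun r => pvGet r tn == c)))) (fun p => p.1) PySem.Dict.empty _ _, ihm]
      have hmap : ((PySem.Set.ofList (rows.map (fun r => pvGet r tn))).map
          (fun c => (c, rows.filter (fun r => pvGet r tn == c)))).map (fun p => p.1)
          = PySem.Set.ofList (rows.map (fun r => pvGet r tn)) := by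
        rw [List.map_map]; simp [Function.comp_def]
      rw [hmap]
      exact set_update_of_subset _ _ (fun x hx => hx)
  have hgot0 : ∀ c, ((PySem.Set.ofList (rows.map (fun r => pvGet r tn))).foldl
      (fun d c => d.insert c (PySem.Dict.empty : PySem.Dict String Int)) PySem.Dict.empty).getD c PySem.Dict.empty
      = PySem.Dict.empty := by
    intro c
    rw [getD_foldl_insert_keyfun]
    split <;> simp [PySem.Dict.getD_empty]
  apply PySem.Dict.ext
  rw [PySem.Dict.items_eq_map_keys _ (by rw [hkL]; exact PySem.Set.nodup_ofList _) PySem.Dict.empty,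
    PySem.Dict.items_eq_map_keys _ (by rw [hkR k]; exact PySem.Set.nodup_ofList _) PySem.Dict.empty,
    hkL, hkR k]
  apply List.map_eq_map_iff.mpr
  intro c hc
  refine congrArg _ ?_
  -- left side: extract the rows of class c, then pass to the value list
  rw [getD_foldl_of_pointwise rows _ (fun r => pvGet r tn)
    (fun r => (fun ctr => PySem.Dict.modify ctr (pvGet r f) 0 (· + 1))^[k]) PySem.Dict.empty c
    (fun d r _ => by
      rw [getD_iterate_modify k _ c PySem.Dict.empty _ d]
      by_cases h : pvGet r tn = c
      · simp [h]
      · simp [h, Ne.symm h]) _, hgot0 c]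
  -- right side: one batch pass per iteration at class c
  have hR : ∀ n (t : PySem.Dict String (PySem.Dict String Int)),
      (((pvWB ((PySem.Set.ofList (rows.map (fun r => pvGet r tn))).map
          (fun c => (c, rows.filter (fun r => pvGet r tn == c)))) f)^[n] t).getD c PySem.Dict.empty)
      = (fun u => ((rows.filter (fun r => pvGet r tn == c)).map (fun r => pvGet r f)).foldl
          (fun t v => t.modify v 0 (· + 1)) u)^[n] (t.getD c PySem.Dict.empty) := by
    intro n
    induction n with
    | zero => simp
    | succ m ihm =>
      intro t
      rw [Function.iterate_succ_apply', Function.iterate_succ_apply', ← ihm t, pvWB,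
        getD_foldl_of_pointwise _ _ (fun p => p.1)
          (fun p => fun ctr => (p.2.map (fun r => pvGet r f)).foldl (fun ctr v => ctr.modify v 0 (· + 1)) ctr)
          PySem.Dict.empty c
          (fun d p _ => by
            by_cases h : p.1 = c
            · rw [← h, PySem.Dict.getD_modify_self]; simp
            · rw [PySem.Dict.getD_modify_of_ne _ _ _ (Ne.symm h)]; simp [h]) _,
        filter_class_pairs _ (PySem.Set.nodup_ofList _) c hc]
      rfl
  rw [hR k, hgot0 c]
  -- both are folds over the class-c value list
  have hL : (rows.filter (fun r => pvGet r tn == c)).foldl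
      (fun v r => (fun ctr => PySem.Dict.modify ctr (pvGet r f) 0 (· + 1))^[k] v) PySem.Dict.empty
      = ((rows.filter (fun r => pvGet r tn == c)).map (fun r => pvGet r f)).foldl
        (fun (t : PySem.Dict String Int) v => (fun t => PySem.Dict.modify t v 0 (· + 1))^[k] t) PySem.Dict.empty := by
    rw [List.foldl_map]
  exact hL.trans (counter_iter_eq ((rows.filter (fun r => pvGet r tn == c)).map (fun r => pvGet r f)) k hk)

theorem build_freq_tables_spec : Claim_equal_build_freq_tables := by
  intro rows fns tn _ _
  unfold Spec_build_freq_tables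
  have hsplit : ∀ (a : PySem.Dict String (PySem.Dict String (PySem.Dict String Int)))
      (b : PySem.Dict String (PySem.Set String)),
      rows.foldl (fun st r =>
        fns.foldl (fun (st : PySem.Dict String (PySem.Dict String (PySem.Dict String Int)) × PySem.Dict String (PySem.Set String)) f =>
          (st.1.modify f PySem.Dict.empty (fun inner =>
             inner.modify (pvGet r tn) PySem.Dict.empty (fun ctr =>
               ctr.modify (pvGet r f) 0 (· + 1))),
           st.2.modify f [] (fun s => PySem.Set.add s (pvGet r f)))) st) (a, b)
      = (rows.foldl (pvStepF fns tn) a, rows.foldl (pvStepV fns) b) := by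
    intro a b
    rw [PySem.List.foldl_congr_mem rows _
      (fun st r => (pvStepF fns tn st.1 r, pvStepV fns st.2 r)) (a, b)
      (fun st r _ => by
        obtain ⟨x, y⟩ := st
        exact PySem.List.foldl_prod_mk
          (f := fun d f => d.modify f PySem.Dict.empty (fun inner =>
            inner.modify (pvGet r tn) PySem.Dict.empty (fun ctr => ctr.modify (pvGet r f) 0 (· + 1))))
          (g := fun d f => d.modify f [] (fun s => PySem.Set.add s (pvGet r f))) fns x y)]
    exact PySem.List.foldl_prod_mk (fun x r => pvStepF fns tn x r) (fun y r => pvStepV fns y r) rows a b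
  simp only [build_freq_tables, build_freq_tables_alt, PySem.Dict.keys_counter]
  rw [groups_items rows tn, groups_keys rows tn, hsplit]
  refine congrArg₂ _ ?_ (congrArg₂ _ ?_ ?_)
  · -- class counts
    rw [PySem.Dict.items_counter, List.map_map]
    apply List.map_eq_map_iff.mpr
    intro c hc
    dsimp only [Function.comp_apply]
    rw [List.count, List.countP_map, List.countP_eq_length_filter]
    rfl
  · -- feature counts
    have hk0A : (fns.foldl (fun d f => d.insert f
        ((PySem.Set.ofList (rows.map (fun r => pvGet r tn))).foldl
          (fun d2 c => d2.insert c (PySem.Dict.empty : PySem.Dict String Int)) PySem.Dict.empty)) PySem.Dict.empty).keys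
        = PySem.Set.ofList fns := keys_foldl_insert_empty fns _
    have hkA : (rows.foldl (pvStepF fns tn) (fns.foldl (fun d f => d.insert f
        ((PySem.Set.ofList (rows.map (fun r => pvGet r tn))).foldl
          (fun d2 c => d2.insert c (PySem.Dict.empty : PySem.Dict String Int)) PySem.Dict.empty)) PySem.Dict.empty)).keys
        = PySem.Set.ofList fns := keys_rows_stepF rows fns tn _ hk0A
    have hkB := keys_B_fold fns ((PySem.Set.ofList (rows.map (fun r => pvGet r tn))).map
        (fun c => (c, rows.filter (fun r => pvGet r tn == c))))
      ((PySem.Set.ofList (rows.map (fun r => pvGet r tn))).foldl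
        (fun d c => d.insert c (PySem.Dict.empty : PySem.Dict String Int)) PySem.Dict.empty)
    rw [PySem.Dict.items_eq_map_keys _ (by rw [hkA]; exact PySem.Set.nodup_ofList _) PySem.Dict.empty,
      PySem.Dict.items_eq_map_keys _ (by rw [hkB]; exact PySem.Set.nodup_ofList _) PySem.Dict.empty,
      hkA, hkB, List.map_map, List.map_map]
    apply List.map_eq_map_iff.mpr
    intro f hfF
    have hffns : f ∈ fns := (PySem.Set.mem_ofList fns f).mp hfF
    have hkc : fns.count f ≠ 0 := by
      have := List.count_pos_iff.mpr hffns
      omega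
    dsimp only [Function.comp_apply]
    refine congrArg _ (congrArg (fun (d : PySem.Dict String (PySem.Dict String Int)) =>
      d.items.map (fun q => (q.1, q.2.items))) ?_)
    rw [getD_rows_stepF rows fns tn f _, getD_foldl_insert_keyfun, if_pos hffns]
    have hB := B_fold_get? fns ((PySem.Set.ofList (rows.map (fun r => pvGet r tn))).map
        (fun c => (c, rows.filter (fun r => pvGet r tn == c))))
      ((PySem.Set.ofList (rows.map (fun r => pvGet r tn))).foldl
        (fun d c => d.insert c (PySem.Dict.empty : PySem.Dict String Int)) PySem.Dict.empty) f PySem.Dict.empty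
    rw [if_pos hffns, PySem.Dict.get?_empty, Option.getD_none] at hB
    rw [PySem.Dict.getD_of_get?_eq_some _ PySem.Dict.empty hB]
    exact level2_eq rows tn f (fns.count f) hkc
  · -- value domains
    have hk0V : (fns.foldl (fun d f => d.insert f (PySem.Set.empty : PySem.Set String)) PySem.Dict.empty).keys
        = PySem.Set.ofList fns := keys_foldl_insert_empty fns _
    have hkV : (rows.foldl (pvStepV fns) (fns.foldl (fun d f => d.insert f (PySem.Set.empty : PySem.Set String)) PySem.Dict.empty)).keys
        = PySem.Set.ofList fns := keys_rows_stepV rows fns _ hk0V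
    have hkW : (fns.foldl (fun d f =>
        d.insert f (PySem.List.sorted (PySem.Set.ofList (rows.map (fun r => pvGet r f))) (fun x => x) false)) PySem.Dict.empty).keys
        = PySem.Set.ofList fns := keys_foldl_insert_empty fns _
    rw [PySem.Dict.items_eq_map_keys _ (by rw [hkV]; exact PySem.Set.nodup_ofList _) [],
      PySem.Dict.items_eq_map_keys _ (by rw [hkW]; exact PySem.Set.nodup_ofList _) [],
      hkV, hkW, List.map_map]
    apply List.map_eq_map_iff.mpr
    intro f hfF
    have hffns : f ∈ fns := (PySem.Set.mem_ofList fns f).mp hfF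
    dsimp only [Function.comp_apply]
    rw [getD_rows_stepV rows fns f hffns, getD_foldl_insert_keyfun, if_pos hffns,
      getD_foldl_insert_keyfun, if_pos hffns, PySem.Set.ofList_eq_foldl, List.foldl_map]
    rfl
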